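-- pv_equiv track=rewrite | github.com/prepperoni/Prep | EPIJudge/epi_judge_python/refueling_schedule.py | find_ample_city
-- ===== SOURCE A (Python) =====
-- def find_ample_city(gallons, distances):
--     MPG = sum(distances) // sum(gallons)
--     least_gas = 0
--     least_gas_city = 0
--     current_gas = 0
--
--     for i in range(1, len(gallons)):
--     	current_gas += gallons[i-1] - distances[i-1] // MPG
--     	if current_gas < least_gas:
--     		least_gas = current_gas
--     		least_gas_city = i
--
--     return least_gas_city
-- ===== SOURCE B (Python) =====
-- def find_ample_city(gallons, distances):
--     mpg = sum(distances) // sum(gallons)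
--     deltas = [g - d // mpg for g, d in zip(gallons[:-1], distances)]
--
--     def solve(lo, hi):
--         # returns (segment sum, minimum prefix sum, index just past its first attainment)
--         if hi - lo == 1:
--             d = deltas[lo]
--             return (d, d, lo + 1)
--         mid = (lo + hi) // 2
--         sl, ml, il = solve(lo, mid)
--         sr, mr, ir = solve(mid, hi)
--         total = sl + sr
--         if ml <= sl + mr:
--             return (total, ml, il)
--         return (total, sl + mr, ir)
--
--     if not deltas:
--         return 0
--     _, m, i = solve(0, len(deltas))
--     return i if m < 0 else 0
-- ===== Notes on version B (the rewrite author's own statement) =====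
-- stated objective: alternative
-- what changed: Replaces A's single left-to-right running-minimum scan with a recursive divide-and-conquer: each half reports (segment sum, minimum prefix sum, first index attaining it) and the two reports are merged, the final answer being that index if the overall minimum is negative, else 0.
import Mathlib
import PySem

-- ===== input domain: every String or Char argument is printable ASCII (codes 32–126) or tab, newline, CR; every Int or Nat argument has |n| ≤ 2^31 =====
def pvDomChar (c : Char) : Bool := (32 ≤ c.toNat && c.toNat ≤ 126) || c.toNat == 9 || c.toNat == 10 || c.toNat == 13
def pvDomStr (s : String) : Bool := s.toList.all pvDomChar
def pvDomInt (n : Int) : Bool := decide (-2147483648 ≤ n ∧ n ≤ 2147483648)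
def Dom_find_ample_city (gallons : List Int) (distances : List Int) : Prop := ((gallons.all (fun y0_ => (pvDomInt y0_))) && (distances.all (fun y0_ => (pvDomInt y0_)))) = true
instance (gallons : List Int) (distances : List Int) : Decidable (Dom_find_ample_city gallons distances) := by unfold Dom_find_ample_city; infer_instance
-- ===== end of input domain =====

-- B replaces A's single running-min scan by a recursive divide-and-conquer that merges
-- (segment sum, minimum prefix sum, first argmin index) reports — an alternative algorithm, same O(n)-ish cost.


-- ===== PORT A =====
def find_ample_city (gallons : List Int) (distances : List Int) : Int :=
  let MPG := PySem.Int.floordiv distances.sum gallons.sum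
  ((PySem.List.pyRange 1 (gallons.length : Int) 1).foldl
    (fun (st : Int × Int × Int) i =>
      let current_gas := st.2.2 + PySem.List.pyGetD gallons (i - 1) 0
        - PySem.Int.floordiv (PySem.List.pyGetD distances (i - 1) 0) MPG
      if current_gas < st.1 then (current_gas, i, current_gas)
      else (st.1, st.2.1, current_gas))
    (0, 0, 0)).2.1

-- ===== PORT B =====
-- Source B's inner 'solve(lo, hi)': divide and conquer over deltas[lo:hi]; Python tests 'hi - lo == 1'
-- and is only ever called with lo < hi, so the '≤ 1' guard here only makes the recursion total
def pvSolve (deltas : List Int) (lo hi : Nat) : Int × Int × Int :=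
  if hi - lo ≤ 1 then
    let d := PySem.List.pyGetD deltas (lo : Int) 0
    (d, d, (lo : Int) + 1)
  else
    let mid := (lo + hi) / 2
    let L := pvSolve deltas lo mid
    let R := pvSolve deltas mid hi
    let total := L.1 + R.1
    if L.2.1 ≤ L.1 + R.2.1 then (total, L.2.1, L.2.2)
    else (total, L.1 + R.2.1, R.2.2)
termination_by hi - lo
decreasing_by all_goals omega

def find_ample_city_alt (gallons : List Int) (distances : List Int) : Int :=
  let mpg := PySem.Int.floordiv distances.sum gallons.sum
  let deltas := (List.zip (PySem.List.slice gallons none (some (-1))) distances).map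
    (fun p => p.1 - PySem.Int.floordiv p.2 mpg)
  if deltas = [] then 0
  else
    let r := pvSolve deltas 0 deltas.length
    if r.2.1 < 0 then r.2.2 else 0

-- ===== PRECONDITION & SPEC =====
-- Pre_ is exactly where A returns: sum(gallons) ≠ 0 (else ZeroDivisionError computing MPG), and
-- when the loop runs (len ≥ 2) also MPG ≠ 0 (else ZeroDivisionError in the body) and enough distances
-- (else IndexError).
def Pre_find_ample_city (gallons : List Int) (distances : List Int) : Prop :=
  gallons.sum ≠ 0 ∧
    (gallons.length ≤ 1 ∨
      (PySem.Int.floordiv distances.sum gallons.sum ≠ 0 ∧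
        gallons.length ≤ distances.length + 1))
instance (gallons : List Int) (distances : List Int) : Decidable (Pre_find_ample_city gallons distances) := by
  unfold Pre_find_ample_city; infer_instance
def pvWitness_find_ample_city : List Int × List Int := ([3, 1, 2], [2, 4, 1])

def Spec_find_ample_city (gallons : List Int) (distances : List Int) (out : Int) : Prop := out = find_ample_city_alt gallons distances
instance (gallons : List Int) (distances : List Int) (out : Int) : Decidable (Spec_find_ample_city gallons distances out) := by unfold Spec_find_ample_city; infer_instance

-- ===== CLAIM (what is proved, stated in full; the proofs are below) =====
def Claim_equal_find_ample_city : Prop := ∀ (gallons : List Int) (distances : List Int), Dom_find_ample_city gallons distances → Pre_find_ample_city gallons distances → Spec_find_ample_city gallons distances (find_ample_city gallons distances)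

-- ===== LEMMAS AND PROOFS =====

-- A's loop, structurally over the list of deltas (state: least, city, current)
def pvLoopA (st : Int × Int × Int) (i : Int) : List Int → Int × Int × Int
  | [] => st
  | d :: ds =>
    let cur := st.2.2 + d
    if cur < st.1 then pvLoopA (cur, i, cur) (i + 1) ds
    else pvLoopA (st.1, st.2.1, cur) (i + 1) ds

-- the common reference scan (state: sum, min prefix, first argmin index)
def pvRun : Int × Int × Int → Int → List Int → Int × Int × Int
  | st, _, [] => st
  | st, j, d :: ds =>
    let s' := st.1 + d
    pvRun (if s' < st.2.1 then (s', s', j + 1) else (s', st.2.1, st.2.2)) (j + 1) ds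

-- the same scan started "cold" on a nonempty list
def pvStand (j : Int) : List Int → Int × Int × Int
  | [] => (0, 0, 0)
  | d :: ds => pvRun (d, d, j + 1) (j + 1) ds

theorem pvFoldl_range_loopA (ds : List Int) : ∀ (j : Int) (st : Int × Int × Int),
    (List.range ds.length).foldl
      (fun st k =>
        let cur := st.2.2 + ds.getD k 0
        if cur < st.1 then (cur, j + (k : Int), cur) else (st.1, st.2.1, cur))
      st
    = pvLoopA st j ds := by
  induction ds with
  | nil => intro j st; rfl
  | cons d ds ih =>
    intro j st
    rw [List.length_cons, List.range_succ_eq_map, List.foldl_cons, List.foldl_map]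
    have hfun : (fun (x : Int × Int × Int) (y : Nat) =>
        let cur := x.2.2 + (d :: ds).getD y.succ 0
        if cur < x.1 then (cur, j + (y.succ : Int), cur) else (x.1, x.2.1, cur))
        = (fun (st : Int × Int × Int) (k : Nat) =>
        let cur := st.2.2 + ds.getD k 0
        if cur < st.1 then (cur, (j + 1) + (k : Int), cur) else (st.1, st.2.1, cur)) := by
      funext x y
      simp only [List.getD_cons_succ]
      have h1 : j + (y.succ : Int) = (j + 1) + (y : Int) := by push_cast; ring
      rw [h1]
    rw [hfun, ih (j + 1)]
    simp only [List.getD_cons_zero, Nat.cast_zero, add_zero, pvLoopA]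
    by_cases h : st.2.2 + d < st.1 <;> simp [h]

-- A's loop is pvRun with permuted state components
theorem pvLoopA_run (ds : List Int) : ∀ (least city cur j : Int),
    pvLoopA (least, city, cur) (j + 1) ds
      = ((pvRun (cur, least, city) j ds).2.1,
         (pvRun (cur, least, city) j ds).2.2,
         (pvRun (cur, least, city) j ds).1) := by
  induction ds with
  | nil => intro least city cur j; rfl
  | cons d ds ih =>
    intro least city cur j
    simp only [pvLoopA, pvRun]
    by_cases h : cur + d < least
    · simpa [h, add_assoc] using ih (cur + d) (j + 1) (cur + d) (j + 1)
    · simpa [h, add_assoc] using ih least city (cur + d) (j + 1)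

theorem pvRun_append (l : List Int) : ∀ (st : Int × Int × Int) (j : Int) (r : List Int),
    pvRun st j (l ++ r) = pvRun (pvRun st j l) (j + (l.length : Int)) r := by
  induction l with
  | nil => intro st j r; simp [pvRun]
  | cons d ds ih =>
    intro st j r
    simp only [List.cons_append, pvRun]
    rw [ih]
    have : j + 1 + (ds.length : Int) = j + ((ds.length : Nat) + 1 : Nat) := by push_cast; ring
    rw [this]
    rfl

theorem pvStand_append (l r : List Int) (hl : l ≠ []) (j : Int) :
    pvStand j (l ++ r) = pvRun (pvStand j l) (j + (l.length : Int)) r := by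
  cases l with
  | nil => exact absurd rfl hl
  | cons d ds =>
    simp only [List.cons_append, pvStand]
    rw [pvRun_append]
    have : j + 1 + (ds.length : Int) = j + ((ds.length : Nat) + 1 : Nat) := by push_cast; ring
    rw [this]
    rfl

-- running the scan warm equals combining the warm state with the cold scan of the same list
theorem pvRun_shift : ∀ (r : List Int), r ≠ [] → ∀ (s m i j : Int),
    pvRun (s, m, i) j r =
      (s + (pvStand j r).1,
        if s + (pvStand j r).2.1 < m then (s + (pvStand j r).2.1, (pvStand j r).2.2)
        else (m, i)) := by
  intro r
  induction r with
  | nil => intro h; exact absurd rfl h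
  | cons d ds ih =>
    intro _ s m i j
    by_cases hds : ds = []
    · subst hds
      simp only [pvRun, pvStand]
      by_cases h : s + d < m <;> simp [h]
    · rcases hP : pvStand (j + 1) ds with ⟨S, Q, I⟩
      have hih := ih hds
      simp only [pvRun]
      have hstand0 : pvStand j (d :: ds)
          = (d + S, if d + Q < d then (d + Q, I) else (d, j + 1)) := by
        simp only [pvStand]
        rw [hih d d (j + 1) (j + 1), hP]
      by_cases h2 : d + Q < d
      · rw [if_pos h2] at hstand0
        rw [hstand0]
        dsimp only
        by_cases h1 : s + d < m
        · rw [if_pos h1, hih (s + d) (s + d) (j + 1) (j + 1), hP]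
          dsimp only
          rw [if_pos (by omega : s + d + Q < s + d), if_pos (by omega : s + (d + Q) < m)]
          exact congrArg₂ Prod.mk (by omega) (congrArg₂ Prod.mk (by omega) (by omega))
        · rw [if_neg h1, hih (s + d) m i (j + 1), hP]
          dsimp only
          by_cases h3 : s + (d + Q) < m
          · rw [if_pos (by omega : s + d + Q < m), if_pos h3]
            exact congrArg₂ Prod.mk (by omega) (congrArg₂ Prod.mk (by omega) (by omega))
          · rw [if_neg (by omega : ¬ s + d + Q < m), if_neg h3]
            exact congrArg₂ Prod.mk (by omega) (congrArg₂ Prod.mk (by omega) (by omega))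
      · rw [if_neg h2] at hstand0
        rw [hstand0]
        dsimp only
        by_cases h1 : s + d < m
        · rw [if_pos h1, hih (s + d) (s + d) (j + 1) (j + 1), hP]
          dsimp only
          rw [if_neg (by omega : ¬ s + d + Q < s + d), if_pos h1]
          exact congrArg₂ Prod.mk (by omega) (congrArg₂ Prod.mk (by omega) (by omega))
        · rw [if_neg h1, hih (s + d) m i (j + 1), hP]
          dsimp only
          rw [if_neg (by omega : ¬ s + d + Q < m), if_neg h1]
          exact congrArg₂ Prod.mk (by omega) (congrArg₂ Prod.mk (by omega) (by omega))

-- the divide-and-conquer computes exactly the cold scan of the segment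
theorem pvSolve_spec (deltas : List Int) : ∀ (n lo hi : Nat), hi - lo ≤ n → lo < hi →
    hi ≤ deltas.length →
    pvSolve deltas lo hi = pvStand (lo : Int) ((deltas.drop lo).take (hi - lo)) := by
  intro n
  induction n with
  | zero => intro lo hi h1 h2 _; omega
  | succ n ih =>
    intro lo hi hn hlt hlen
    by_cases h1 : hi - lo ≤ 1
    · have hhl : hi - lo = 1 := by omega
      have hlo : lo < deltas.length := by omega
      rw [pvSolve, if_pos h1, hhl]
      rw [List.drop_eq_getElem_cons hlo]
      simp only [List.take_succ_cons, List.take_zero]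
      simp only [pvStand, pvRun]
      rw [PySem.List.pyGetD_natCast, List.getD_eq_getElem deltas 0 hlo]
    · rw [pvSolve, if_neg h1]
      show (if (pvSolve deltas lo ((lo + hi) / 2)).2.1
            ≤ (pvSolve deltas lo ((lo + hi) / 2)).1 + (pvSolve deltas ((lo + hi) / 2) hi).2.1
          then ((pvSolve deltas lo ((lo + hi) / 2)).1 + (pvSolve deltas ((lo + hi) / 2) hi).1,
                (pvSolve deltas lo ((lo + hi) / 2)).2.1, (pvSolve deltas lo ((lo + hi) / 2)).2.2)
          else ((pvSolve deltas lo ((lo + hi) / 2)).1 + (pvSolve deltas ((lo + hi) / 2) hi).1,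
                (pvSolve deltas lo ((lo + hi) / 2)).1 + (pvSolve deltas ((lo + hi) / 2) hi).2.1,
                (pvSolve deltas ((lo + hi) / 2) hi).2.2))
        = pvStand (lo : Int) ((deltas.drop lo).take (hi - lo))
      have hmid1 : lo < (lo + hi) / 2 := by omega
      have hmid2 : (lo + hi) / 2 < hi := by omega
      rw [ih lo ((lo + hi) / 2) (by omega) hmid1 (by omega),
          ih ((lo + hi) / 2) hi (by omega) hmid2 hlen]
      have hsplit : (deltas.drop lo).take (hi - lo)
          = (deltas.drop lo).take ((lo + hi) / 2 - lo)
            ++ (deltas.drop ((lo + hi) / 2)).take (hi - (lo + hi) / 2) := by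
        have h : hi - lo = ((lo + hi) / 2 - lo) + (hi - (lo + hi) / 2) := by omega
        rw [h, List.take_add]
        congr 2
        rw [List.drop_drop]
        congr 1
        omega
      have hLlen : ((deltas.drop lo).take ((lo + hi) / 2 - lo)).length = (lo + hi) / 2 - lo := by
        rw [List.length_take, List.length_drop]; omega
      have hLne : (deltas.drop lo).take ((lo + hi) / 2 - lo) ≠ [] := by
        intro h; rw [h] at hLlen; simp at hLlen; omega
      have hRne : (deltas.drop ((lo + hi) / 2)).take (hi - (lo + hi) / 2) ≠ [] := by
        intro h
        have := congrArg List.length h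
        rw [List.length_take, List.length_drop] at this
        simp at this; omega
      rw [hsplit, pvStand_append _ _ hLne, hLlen]
      have hcast : (lo : Int) + (((lo + hi) / 2 - lo : Nat) : Int) = (((lo + hi) / 2 : Nat) : Int) := by
        push_cast [Nat.cast_sub (le_of_lt hmid1)]; ring
      rw [hcast]
      rcases hL : pvStand (lo : Int) ((deltas.drop lo).take ((lo + hi) / 2 - lo)) with ⟨sl, ml, il⟩
      rw [pvRun_shift _ hRne]
      rcases hR : pvStand (((lo + hi) / 2 : Nat) : Int)
          ((deltas.drop ((lo + hi) / 2)).take (hi - (lo + hi) / 2)) with ⟨sr, mr, ir⟩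
      dsimp only
      by_cases hc : ml ≤ sl + mr
      · rw [if_pos hc, if_neg (by omega)]
      · rw [if_neg hc, if_pos (by omega)]

theorem pv_main (gallons distances : List Int)
    (hne : gallons ≠ []) (hd : gallons.length ≤ distances.length + 1) :
    find_ample_city gallons distances = find_ample_city_alt gallons distances := by
  set mpg := PySem.Int.floordiv distances.sum gallons.sum with hmpg
  set ds : List Int := (List.zip gallons.dropLast distances).map
      (fun p => p.1 - PySem.Int.floordiv p.2 mpg) with hds
  have hn1 : 1 ≤ gallons.length := by
    cases gallons with
    | nil => exact absurd rfl hne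
    | cons a l => simp
  have hlen : ds.length = gallons.length - 1 := by
    simp [hds]
    omega
  -- ===== A side: the range-foldl is pvLoopA over ds =====
  have hA : find_ample_city gallons distances = (pvLoopA (0, 0, 0) 1 ds).2.1 := by
    rw [find_ample_city]
    rw [PySem.List.pyRange_one, List.foldl_map]
    have htn : ((gallons.length : Int) - 1).toNat = ds.length := by
      rw [hlen]; omega
    rw [htn]
    rw [PySem.List.foldl_congr_mem (List.range ds.length)
      (fun (st : Int × Int × Int) (k : Nat) =>
        let current_gas := st.2.2 + PySem.List.pyGetD gallons (1 + (k : Int) - 1) 0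
          - PySem.Int.floordiv (PySem.List.pyGetD distances (1 + (k : Int) - 1) 0) mpg
        if current_gas < st.1 then (current_gas, 1 + (k : Int), current_gas)
        else (st.1, st.2.1, current_gas))
      (fun (st : Int × Int × Int) (k : Nat) =>
        let cur := st.2.2 + ds.getD k 0
        if cur < st.1 then (cur, (1 : Int) + (k : Int), cur) else (st.1, st.2.1, cur))
      (0, 0, 0) ?_]
    · exact congrArg (fun s : Int × Int × Int => s.2.1) (pvFoldl_range_loopA ds 1 (0, 0, 0))
    · intro acc k hk
      rw [List.mem_range] at hk
      have hkg : k < gallons.length := by omega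
      have hkd : k < distances.length := by omega
      have hidx : (1 : Int) + (k : Int) - 1 = ((k : Nat) : Int) := by ring
      simp only [hidx, PySem.List.pyGetD_natCast]
      have hkds : k < ds.length := by omega
      have hdsk : ds.getD k 0 = gallons.getD k 0
          - PySem.Int.floordiv (distances.getD k 0) mpg := by
        rw [List.getD_eq_getElem ds 0 hkds, List.getD_eq_getElem gallons 0 hkg,
          List.getD_eq_getElem distances 0 hkd]
        simp [hds]
      simp only [hdsk, add_sub_assoc]
  -- ===== B side: deltas = ds, divide-and-conquer = cold scan =====
  have hBd : find_ample_city_alt gallons distances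
      = if ds = [] then 0
        else if (pvSolve ds 0 ds.length).2.1 < 0 then (pvSolve ds 0 ds.length).2.2 else 0 := by
    rw [find_ample_city_alt]
    simp only [← hmpg, PySem.List.slice_to_neg_one, ← hds]
  rw [hA, hBd]
  cases hc : ds with
  | nil => simp [pvLoopA]
  | cons d tl =>
    have hne' : ds ≠ [] := by rw [hc]; simp
    rw [← hc]
    rw [if_neg hne']
    rw [pvSolve_spec ds ds.length 0 ds.length (by omega) (by rw [hc]; simp) (le_refl _)]
    simp only [Nat.sub_zero, List.drop_zero, List.take_length, Nat.cast_zero]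
    have hA2 : (pvLoopA (0, 0, 0) 1 ds).2.1 = (pvRun (0, 0, 0) 0 ds).2.2 := by
      have := pvLoopA_run ds 0 0 0 0
      simp only [zero_add] at this
      rw [this]
    rw [hA2, pvRun_shift ds hne' 0 0 0 0]
    rcases hS : pvStand 0 ds with ⟨S, M, I⟩
    dsimp only
    simp only [zero_add]
    by_cases h : M < 0 <;> simp [h]

-- ===== VERDICT (by name: the statement is the Claim_ definition above) =====
theorem find_ample_city_spec : Claim_equal_find_ample_city := by
  intro gallons distances _ hpre
  unfold Spec_find_ample_city
  obtain ⟨hsum, hrest⟩ := hpre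
  have hne : gallons ≠ [] := by
    intro h; rw [h] at hsum; exact hsum rfl
  have hd : gallons.length ≤ distances.length + 1 := by
    rcases hrest with h1 | ⟨_, h2⟩
    · omega
    · exact h2
  exact pv_main gallons distances hne hd
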